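-- pv_equiv track=rewrite | github.com/lrausch23/Investor | src/adapters/ib_flex_offline/adapter.py | _get_any
-- ===== SOURCE A (Python) =====
-- from typing import Any, Optional
--
-- def _norm_key(s: str) -> str:
--     return "".join(ch for ch in (s or "").strip().lower() if ch.isalnum() or ch == "_")
--
-- def _get_any(row: dict[str, Any], keys: list[str]) -> Optional[str]:
--     norm = {_norm_key(k): k for k in row.keys()}
--     for k in keys:
--         kk = _norm_key(k)
--         if kk in norm:
--             v = row.get(norm[kk])
--             if v is None:
--                 continue
--             sv = str(v).strip()
--             if sv != "":
--                 return sv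
--     return None
-- ===== SOURCE B (Python) =====
-- from typing import Any, Optional
--
-- def _norm_key(s: str) -> str:
--     return "".join(ch for ch in (s or "").strip().lower() if ch.isalnum() or ch == "_")
--
-- def _get_any(row: dict[str, Any], keys: list[str]) -> Optional[str]:
--     for k in keys:
--         kk = _norm_key(k)
--         for rk, rv in row.items():
--             if _norm_key(rk) == kk:
--                 if rv is not None:
--                     sv = str(rv).strip()
--                     if sv:
--                         return sv
--                 break
--     return None
-- ===== Notes on version B (the rewrite author's own statement) =====
-- stated objective: simpler
-- what changed: B drops A's precomputed normalized-key dict and instead scans the row's items directly for each target key, stopping at the first normalized match; Pre_ excludes rows in which two distinct keys share the same normalized form, where A's dict-comprehension last-wins choice vs B's first-match choice are both accidental.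
-- outside the precondition, e.g. on _get_any({'A': 'x', 'a': 'y'}, ['a']): A returns 'y', B returns 'x'
import Mathlib
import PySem

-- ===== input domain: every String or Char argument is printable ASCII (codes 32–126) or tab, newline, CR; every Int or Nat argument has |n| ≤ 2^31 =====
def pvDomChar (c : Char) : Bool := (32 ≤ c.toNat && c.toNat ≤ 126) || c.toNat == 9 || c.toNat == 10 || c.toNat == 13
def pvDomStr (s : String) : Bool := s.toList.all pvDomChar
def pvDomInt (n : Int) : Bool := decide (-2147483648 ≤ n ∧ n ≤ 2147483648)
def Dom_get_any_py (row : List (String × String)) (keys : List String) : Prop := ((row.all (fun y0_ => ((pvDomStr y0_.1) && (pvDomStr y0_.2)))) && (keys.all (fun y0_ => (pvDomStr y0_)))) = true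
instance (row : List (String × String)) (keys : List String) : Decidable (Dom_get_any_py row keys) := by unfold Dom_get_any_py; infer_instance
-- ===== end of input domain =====

-- B replaces A's precomputed normalized-key dict by a direct per-key scan of the row
-- stopping at the first normalized match (objective: simpler; return value only).

-- shared helper _norm_key: "".join of the kept characters = String.ofList of the filtered
-- char list (exact); '(s or "")' equals s here since strip/lower/filter of "" yield "".
def normKey (s : String) : String :=
  String.ofList ((PySem.Chars.lower (PySem.Chars.strip s.toList)).filter
    (fun ch => PySem.Chars.isalnum ch || ch == '_'))

-- ===== PORT A =====
-- the 'for k in keys' loop of A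
def goA (rowD : PySem.Dict String String) (norm : PySem.Dict String String) :
    List String → Option String
  | [] => none
  | k :: rest =>
    let kk := normKey k
    match norm.get? kk with
    | some ok =>
      match rowD.get? ok with
      | none => goA rowD norm rest          -- v is None → continue (dead for str values)
      | some v =>
        let sv := PySem.Str.strip v         -- str(v) = v for a str value
        if sv ≠ "" then some sv else goA rowD norm rest
    | none => goA rowD norm rest

def get_any_py (row : List (String × String)) (keys : List String) : Option String :=
  let rowD := PySem.Dict.ofList row
  let norm := rowD.keys.foldl (fun d k => d.insert (normKey k) k) PySem.Dict.empty
  goA rowD norm keys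

-- ===== PORT B =====
-- inner 'for rk, rv in row.items(): … break' loop = first item whose normalized key matches
def goB (items : List (String × String)) : List String → Option String
  | [] => none
  | k :: rest =>
    let kk := normKey k
    match items.find? (fun p => normKey p.1 == kk) with
    | none => goB items rest
    | some (_, v) =>                        -- rv is a str here, never None
      let sv := PySem.Str.strip v
      if sv ≠ "" then some sv else goB items rest

def get_any_py_alt (row : List (String × String)) (keys : List String) : Option String :=
  goB (PySem.Dict.ofList row).items keys

-- ===== PRECONDITION & SPEC =====
-- Pre_ excludes rows in which two distinct keys share the same normalized form: there A's
-- dict-comprehension keeps the LAST such key while B's scan stops at the FIRST, and neither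
-- choice is specified — the collision winner is accidental on both sides.
def Pre_get_any_py (row : List (String × String)) (keys : List String) : Prop :=
  (((PySem.Dict.ofList row).keys.map normKey).Nodup)
instance (row : List (String × String)) (keys : List String) : Decidable (Pre_get_any_py row keys) := by unfold Pre_get_any_py; infer_instance

def pvWitness_get_any_py : (List (String × String)) × List String :=
  ([("Amount ", "12"), ("Fee", "")], ["fee", "amount"])

def Spec_get_any_py (row : List (String × String)) (keys : List String) (out : Option String) : Prop := out = get_any_py_alt row keys
instance (row : List (String × String)) (keys : List String) (out : Option String) : Decidable (Spec_get_any_py row keys out) := by unfold Spec_get_any_py; infer_instance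

-- ===== CLAIM =====
def Claim_equal_get_any_py : Prop := ∀ (row : List (String × String)) (keys : List String), Dom_get_any_py row keys → Pre_get_any_py row keys → Spec_get_any_py row keys (get_any_py row keys)

-- ===== LEMMAS AND PROOFS =====

-- a fold that never matches keeps its accumulator
theorem foldl_no_match (kk : String) (t : List String) (init : Option String)
    (h : ∀ k ∈ t, normKey k ≠ kk) :
    t.foldl (fun acc k => if normKey k == kk then some k else acc) init = init := by
  induction t generalizing init with
  | nil => rfl
  | cons x xs ih =>
    rw [List.foldl_cons, if_neg (by simp [h x (by simp)])]
    exact ih init (fun k hk => h k (by simp [hk]))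

-- with nodup normalized keys, the last matching key equals the first matching key
theorem last_eq_first (kk : String) (ks : List String) (h : (ks.map normKey).Nodup) :
    ks.foldl (fun acc k => if normKey k == kk then some k else acc) none
      = ks.find? (fun k => normKey k == kk) := by
  induction ks with
  | nil => rfl
  | cons x xs ih =>
    rw [List.map_cons, List.nodup_cons] at h
    rw [List.foldl_cons, List.find?_cons]
    by_cases hx : normKey x = kk
    · rw [if_pos (by simp [hx])]
      have : ∀ k ∈ xs, normKey k ≠ kk := by
        intro k hk he
        exact h.1 (by rw [hx, ← he]; exact List.mem_map_of_mem hk)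
      rw [foldl_no_match kk xs (some x) this]
      simp [hx]
    · rw [if_neg (by simp [hx])]
      have : (normKey x == kk) = false := by simp [hx]
      rw [this]
      exact ih h.2

-- A's norm-dict lookup is the LAST key whose normalized form is kk
theorem norm_get? (kk : String) (ks : List String) :
    (ks.foldl (fun d k => d.insert (normKey k) k) PySem.Dict.empty).get? kk
      = ks.foldl (fun acc k => if normKey k == kk then some k else acc) none := by
  induction ks using List.reverseRecOn with
  | nil => rfl
  | append_singleton l x ih =>
    rw [List.foldl_append, List.foldl_append, List.foldl_cons, List.foldl_nil,
        List.foldl_cons, List.foldl_nil, PySem.Dict.get?_insert, ih]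
    by_cases hx : normKey x = kk
    · rw [if_pos hx.symm, if_pos (by simp [hx])]
    · rw [if_neg (fun h => hx h.symm), if_neg (by simp [hx])]

-- on a nodup-keyed item list, the found item's key looks up to the found item's value
theorem get?_of_find? (q : String × String → Bool) (items : List (String × String))
    (hnd : (items.map Prod.fst).Nodup) (ok v : String)
    (h : items.find? q = some (ok, v)) :
    (PySem.Dict.mk items).get? ok = some v := by
  induction items with
  | nil => simp at h
  | cons p t ih =>
    rw [List.map_cons, List.nodup_cons] at hnd
    rw [List.find?_cons] at h
    rw [PySem.Dict.get?_mk_cons]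
    by_cases hq : q p = true
    · rw [hq] at h
      cases h
      simp
    · rw [Bool.not_eq_true] at hq
      rw [hq] at h
      have hmem : (ok, v) ∈ t := List.mem_of_find?_eq_some h
      have hne : (p.1 == ok) = false := by
        apply beq_eq_false_iff_ne.mpr
        intro he
        exact hnd.1 (he ▸ List.mem_map_of_mem hmem)
      rw [hne]
      exact ih hnd.2 h

theorem goA_eq_goB (d : PySem.Dict String String) (hnd : d.keys.Nodup)
    (hpre : (d.keys.map normKey).Nodup) (keys : List String) :
    goA d (d.keys.foldl (fun dd k => dd.insert (normKey k) k) PySem.Dict.empty) keys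
      = goB d.items keys := by
  have hmk : PySem.Dict.mk d.items = d := by apply PySem.Dict.ext; rfl
  have hkeys : d.keys = d.items.map Prod.fst := rfl
  induction keys with
  | nil => rfl
  | cons k rest ih =>
    unfold goA goB
    dsimp only
    rw [norm_get?, last_eq_first _ _ hpre]
    have hfind : d.keys.find? (fun x => normKey x == normKey k)
        = Option.map Prod.fst (d.items.find? (fun p => normKey p.1 == normKey k)) := by
      rw [hkeys, List.find?_map]
      rfl
    rw [hfind]
    cases hf : d.items.find? (fun p => normKey p.1 == normKey k) with
    | none => simpa [hf] using ih
    | some pv =>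
      obtain ⟨ok, v⟩ := pv
      have hget : d.get? ok = some v := by
        rw [← hmk]
        exact get?_of_find? _ d.items (by rw [← hkeys]; exact hnd) ok v hf
      simp only [Option.map_some, hget]
      split_ifs with hsv
      · rfl
      · exact ih

-- ===== VERDICT =====
theorem get_any_py_spec : Claim_equal_get_any_py := by
  intro row keys _ hpre
  unfold Spec_get_any_py get_any_py get_any_py_alt
  exact goA_eq_goB (PySem.Dict.ofList row) (PySem.Dict.nodup_keys_ofList row) hpre keys
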